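-- pv_equiv track=rewrite | github.com/RivenKid69/crm-sales-bot-fork | scripts/root_cause_chain_audit.py | first_pattern_rank
-- ===== SOURCE A (Python) =====
-- from typing import Any, Dict, Iterable, List, Optional, Sequence, Set, Tuple
--
-- def first_pattern_rank(keys: Sequence[str], patterns: Sequence[str]) -> Optional[int]:
--     if not patterns:
--         return None
--     lowered_patterns = [p.lower() for p in patterns]
--     for idx, key in enumerate(keys, 1):
--         key_l = key.lower()
--         if any(p in key_l for p in lowered_patterns):
--             return idx
--     return None
-- ===== SOURCE B (Python) =====
-- def first_pattern_rank(keys, patterns):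
--     if not patterns:
--         return None
--     keys_l = [k.lower() for k in keys]
--     best = None
--     for p in patterns:
--         pl = p.lower()
--         for i, kl in enumerate(keys_l, 1):
--             if best is not None and i >= best:
--                 break
--             if pl in kl:
--                 best = i
--                 break
--     return best
-- ===== Notes on version B (the rewrite author's own statement) =====
-- stated objective: alternative
-- what changed: B inverts the traversal: instead of scanning keys and testing every pattern per key, it scans patterns, finds each pattern's first matching key index, and returns the minimum of those indices.
import Mathlib
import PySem

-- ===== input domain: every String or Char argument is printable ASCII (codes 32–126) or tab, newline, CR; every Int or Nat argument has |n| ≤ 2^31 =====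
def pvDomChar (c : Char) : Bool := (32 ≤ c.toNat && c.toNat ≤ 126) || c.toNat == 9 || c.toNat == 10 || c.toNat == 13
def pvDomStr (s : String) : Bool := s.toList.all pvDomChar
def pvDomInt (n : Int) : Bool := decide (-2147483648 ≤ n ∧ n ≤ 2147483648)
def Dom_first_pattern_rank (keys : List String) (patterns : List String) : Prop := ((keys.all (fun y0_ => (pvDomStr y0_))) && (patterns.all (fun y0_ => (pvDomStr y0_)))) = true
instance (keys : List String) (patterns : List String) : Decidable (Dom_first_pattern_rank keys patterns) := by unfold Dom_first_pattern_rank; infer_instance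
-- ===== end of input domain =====

-- B inverts the traversal: pattern-outer bounded min-search instead of A's key-outer any-test; same result, alternative structure.

-- ===== PORT A =====
-- A's key loop with early return: first enumerated key whose lowering contains some lowered pattern.
def pvALoop (lowered : List String) : List (Int × String) → Option Int
  | [] => none
  | (idx, key) :: rest =>
    if lowered.any (fun p => PySem.Str.isIn p (PySem.Str.lower key)) then some idx
    else pvALoop lowered rest

def first_pattern_rank (keys : List String) (patterns : List String) : Option Int :=
  if patterns.isEmpty then none
  else pvALoop (patterns.map PySem.Str.lower) (PySem.List.enumerate keys 1)

-- ===== PORT B =====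
-- B's inner loop: scan enumerated (pre-lowered) keys, stopping at indices ≥ current best, break on first hit.
def pvScan (pl : String) : Option Int → List (Int × String) → Option Int
  | best, [] => best
  | best, (i, kl) :: rest =>
    if (match best with | none => false | some b => decide (b ≤ i)) then best
    else if PySem.Str.isIn pl kl then some i
    else pvScan pl best rest

def first_pattern_rank_alt (keys : List String) (patterns : List String) : Option Int :=
  if patterns.isEmpty then none
  else
    let ekeys := PySem.List.enumerate (keys.map PySem.Str.lower) 1
    patterns.foldl (fun best p => pvScan (PySem.Str.lower p) best ekeys) none

-- ===== PRECONDITION & SPEC =====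
def Spec_first_pattern_rank (keys : List String) (patterns : List String) (out : Option Int) : Prop := out = first_pattern_rank_alt keys patterns
instance (keys : List String) (patterns : List String) (out : Option Int) : Decidable (Spec_first_pattern_rank keys patterns out) := by unfold Spec_first_pattern_rank; infer_instance

-- ===== CLAIM (what is proved, stated in full; the proofs are below) =====
def Claim_equal_first_pattern_rank : Prop := ∀ (keys : List String) (patterns : List String), Dom_first_pattern_rank keys patterns → Spec_first_pattern_rank keys patterns (first_pattern_rank keys patterns)

-- ===== LEMMAS AND PROOFS =====

-- second-component lowering commutes with enumerate
theorem pv_enum_map (xs : List String) (s : Int) :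
    PySem.List.enumerate (xs.map PySem.Str.lower) s
      = (PySem.List.enumerate xs s).map (fun pr => (pr.1, PySem.Str.lower pr.2)) := by
  induction xs generalizing s with
  | nil => simp [PySem.List.enumerate_nil]
  | cons x xs ih => simp [PySem.List.enumerate_cons, ih]

-- a scan over enumerated keys either keeps its best or returns an index ≥ the start
theorem pvScan_enum_cases (pl : String) (b : Option Int) (xs : List String) (t : Int) :
    pvScan pl b ((PySem.List.enumerate xs t).map (fun pr => (pr.1, PySem.Str.lower pr.2))) = b ∨
      ∃ j, pvScan pl b ((PySem.List.enumerate xs t).map (fun pr => (pr.1, PySem.Str.lower pr.2))) = some j ∧ t ≤ j := by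
  induction xs generalizing t with
  | nil => left; simp [PySem.List.enumerate_nil, pvScan]
  | cons x xs ih =>
    cases b with
    | none =>
      simp only [PySem.List.enumerate_cons, List.map_cons, pvScan]
      rw [if_neg (by simp)]
      by_cases hm : PySem.Str.isIn pl (PySem.Str.lower x) = true
      · right; rw [if_pos hm]; exact ⟨t, rfl, le_refl t⟩
      · rw [if_neg hm]
        rcases ih (t + 1) with h | ⟨j, h, hj⟩
        · left; exact h
        · right; exact ⟨j, h, by omega⟩
    | some bb =>
      simp only [PySem.List.enumerate_cons, List.map_cons, pvScan]
      by_cases hg : bb ≤ t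
      · rw [if_pos (by simpa using hg)]; left; rfl
      · rw [if_neg (by simpa using hg)]
        by_cases hm : PySem.Str.isIn pl (PySem.Str.lower x) = true
        · right; rw [if_pos hm]; exact ⟨t, rfl, le_refl t⟩
        · rw [if_neg hm]
          rcases ih (t + 1) with h | ⟨j, h, hj⟩
          · left; exact h
          · right; exact ⟨j, h, by omega⟩

-- if some pattern in ps hits the head key (index s), the fold lands on some s
theorem pv_fold_hit (s : Int) (kl : String) (xs' : List String) :
    ∀ (ps : List String) (b : Option Int),
      (b = none ∨ ∃ j, b = some j ∧ s ≤ j) →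
      (∃ p ∈ ps, PySem.Str.isIn (PySem.Str.lower p) kl = true) →
      ps.foldl (fun b p => pvScan (PySem.Str.lower p) b
          ((s, kl) :: (PySem.List.enumerate xs' (s + 1)).map (fun pr => (pr.1, PySem.Str.lower pr.2)))) b = some s := by
  intro ps
  induction ps with
  | nil => intro b _ hex; simp at hex
  | cons p ps ih =>
    intro b hb hex
    by_cases hp : PySem.Str.isIn (PySem.Str.lower p) kl = true
    · -- head pattern hits (or the bound already holds at s): best becomes some s, then the bound keeps it
      have hstep : pvScan (PySem.Str.lower p) b
          ((s, kl) :: (PySem.List.enumerate xs' (s + 1)).map (fun pr => (pr.1, PySem.Str.lower pr.2))) = some s := by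
        simp only [pvScan]
        rcases hb with rfl | ⟨j, rfl, hj⟩
        · rw [if_neg (by simp)]; rw [if_pos hp]
        · by_cases hjs : j ≤ s
          · rw [if_pos (by simpa using hjs), le_antisymm hjs hj]
          · rw [if_neg (by simpa using hjs)]; rw [if_pos hp]
      rw [List.foldl_cons, hstep]
      -- every later pattern stops at the head: bound s ≤ s
      clear hstep hex hp ih hb
      induction ps with
      | nil => rfl
      | cons q qs ihq =>
        rw [List.foldl_cons]
        have : pvScan (PySem.Str.lower q) (some s)
            ((s, kl) :: (PySem.List.enumerate xs' (s + 1)).map (fun pr => (pr.1, PySem.Str.lower pr.2))) = some s := by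
          simp only [pvScan]
          rw [if_pos (by simp)]
        rw [this]; exact ihq
    · -- head pattern misses the head key: the invariant is preserved and a witness remains in ps
      have hb' : pvScan (PySem.Str.lower p) b
            ((s, kl) :: (PySem.List.enumerate xs' (s + 1)).map (fun pr => (pr.1, PySem.Str.lower pr.2))) = none ∨
          ∃ j, pvScan (PySem.Str.lower p) b
            ((s, kl) :: (PySem.List.enumerate xs' (s + 1)).map (fun pr => (pr.1, PySem.Str.lower pr.2))) = some j ∧ s ≤ j := by
        simp only [pvScan]
        rcases hb with rfl | ⟨j, rfl, hj⟩
        · rw [if_neg (by simp), if_neg hp]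
          rcases pvScan_enum_cases (PySem.Str.lower p) none xs' (s + 1) with h | ⟨j, h, hjj⟩
          · left; exact h
          · right; exact ⟨j, h, by omega⟩
        · by_cases hjs : j ≤ s
          · rw [if_pos (by simpa using hjs)]; right; exact ⟨j, rfl, hj⟩
          · rw [if_neg (by simpa using hjs), if_neg hp]
            rcases pvScan_enum_cases (PySem.Str.lower p) (some j) xs' (s + 1) with h | ⟨j', h, hjj⟩
            · right; exact ⟨j, h, hj⟩
            · right; exact ⟨j', h, by omega⟩
      rcases hex with ⟨q, hq, hqin⟩
      rcases List.mem_cons.mp hq with rfl | hq'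
      · exact absurd hqin hp
      · rw [List.foldl_cons]; exact ih _ hb' ⟨q, hq', hqin⟩

-- if no pattern in ps hits the head key, the head is skipped (the invariant keeps the bound off it)
theorem pv_fold_skip (s : Int) (kl : String) (xs' : List String) (ps : List String)
    (hno : ∀ p ∈ ps, ¬ PySem.Str.isIn (PySem.Str.lower p) kl = true) :
    ∀ b : Option Int, (b = none ∨ ∃ j, b = some j ∧ s + 1 ≤ j) →
      ps.foldl (fun b p => pvScan (PySem.Str.lower p) b
          ((s, kl) :: (PySem.List.enumerate xs' (s + 1)).map (fun pr => (pr.1, PySem.Str.lower pr.2)))) b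
      = ps.foldl (fun b p => pvScan (PySem.Str.lower p) b
          ((PySem.List.enumerate xs' (s + 1)).map (fun pr => (pr.1, PySem.Str.lower pr.2)))) b := by
  induction ps with
  | nil => intro b _; rfl
  | cons p ps ih =>
    intro b hb
    have hp := hno p (List.mem_cons_self ..)
    have hstep : pvScan (PySem.Str.lower p) b
        ((s, kl) :: (PySem.List.enumerate xs' (s + 1)).map (fun pr => (pr.1, PySem.Str.lower pr.2)))
        = pvScan (PySem.Str.lower p) b
        ((PySem.List.enumerate xs' (s + 1)).map (fun pr => (pr.1, PySem.Str.lower pr.2))) := by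
      simp only [pvScan]
      rcases hb with rfl | ⟨j, rfl, hj⟩
      · rw [if_neg (by simp), if_neg hp]
      · rw [if_neg (by simp; omega), if_neg hp]
    have hb' : pvScan (PySem.Str.lower p) b
          ((PySem.List.enumerate xs' (s + 1)).map (fun pr => (pr.1, PySem.Str.lower pr.2))) = none ∨
        ∃ j, pvScan (PySem.Str.lower p) b
          ((PySem.List.enumerate xs' (s + 1)).map (fun pr => (pr.1, PySem.Str.lower pr.2))) = some j ∧ s + 1 ≤ j := by
      rcases pvScan_enum_cases (PySem.Str.lower p) b xs' (s + 1) with h | ⟨j, h, hj⟩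
      · rw [h]; exact hb
      · right; exact ⟨j, h, hj⟩
    rw [List.foldl_cons, List.foldl_cons, hstep]
    exact ih (fun q hq => hno q (List.mem_cons_of_mem _ hq)) _ hb'

-- the fold over patterns equals A's key loop, on enumerated keys from any start
theorem pv_main (xs : List String) (s : Int) (ps : List String) :
    ps.foldl (fun b p => pvScan (PySem.Str.lower p) b
        ((PySem.List.enumerate xs s).map (fun pr => (pr.1, PySem.Str.lower pr.2)))) none
      = pvALoop (ps.map PySem.Str.lower) (PySem.List.enumerate xs s) := by
  induction xs generalizing s with
  | nil =>
    simp only [PySem.List.enumerate_nil, List.map_nil, pvALoop]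
    induction ps with
    | nil => rfl
    | cons p ps ih => simp only [List.foldl_cons, pvScan]; exact ih
  | cons x xs ih =>
    simp only [PySem.List.enumerate_cons, List.map_cons, pvALoop, List.any_map]
    by_cases h : ps.any (fun p => PySem.Str.isIn (PySem.Str.lower p) (PySem.Str.lower x)) = true
    · rw [if_pos (by simpa [Function.comp] using h)]
      exact pv_fold_hit s (PySem.Str.lower x) xs ps none (Or.inl rfl)
        (by simpa [List.any_eq_true] using h)
    · rw [if_neg (by simpa [Function.comp] using h)]
      rw [pv_fold_skip s (PySem.Str.lower x) xs ps
        (fun p hp ht => h (List.any_eq_true.mpr ⟨p, hp, ht⟩)) none (Or.inl rfl)]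
      exact ih (s + 1)

-- ===== VERDICT (by name: the statement is the Claim_ definition above) =====
theorem first_pattern_rank_spec : Claim_equal_first_pattern_rank := by
  intro keys patterns _
  unfold Spec_first_pattern_rank first_pattern_rank first_pattern_rank_alt
  by_cases h : patterns.isEmpty
  · simp [h]
  · simp only [h, if_false, Bool.false_eq_true]
    rw [pv_enum_map]
    exact (pv_main keys 1 patterns).symm
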